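-- pv_equiv track=rewrite | github.com/gavinkoma/lateralreticularnucleus | sanity_check_attempt_new_origin.py | pick_wrist_bodypart
-- ===== SOURCE A (Python) =====
-- def pick_wrist_bodypart(bodyparts: list[str], side: str) -> str:
--     s = side.lower()
--     cands = [bp for bp in bodyparts if "wrist" in bp.lower() and s in bp.lower()]
--     if cands:
--         return sorted(cands)[0]
--     cands = [bp for bp in bodyparts if "wrist" in bp.lower()]
--     if cands:
--         return sorted(cands)[0]
--     raise RuntimeError("Could not auto-detect a wrist bodypart (no bodypart contains 'wrist').")
-- ===== SOURCE B (Python) =====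
-- def pick_wrist_bodypart(bodyparts: list[str], side: str) -> str:
--     s = side.lower()
--     best_both = None   # lexicographically smallest bp containing 'wrist' and the side
--     best_wrist = None  # lexicographically smallest bp containing 'wrist'
--     for bp in bodyparts:
--         low = bp.lower()
--         if "wrist" in low:
--             best_wrist = bp if best_wrist is None else min(best_wrist, bp)
--             if s in low:
--                 best_both = bp if best_both is None else min(best_both, bp)
--     if best_both is not None:
--         return best_both
--     if best_wrist is not None:
--         return best_wrist
--     raise RuntimeError("Could not auto-detect a wrist bodypart (no bodypart contains 'wrist').")
-- ===== Notes on version B (the rewrite author's own statement) =====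
-- stated objective: alternative
-- what changed: Replaced A's two filter-then-sort passes by a single scan maintaining two running lexicographic minima (best match with side, best wrist-only match).
import Mathlib
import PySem

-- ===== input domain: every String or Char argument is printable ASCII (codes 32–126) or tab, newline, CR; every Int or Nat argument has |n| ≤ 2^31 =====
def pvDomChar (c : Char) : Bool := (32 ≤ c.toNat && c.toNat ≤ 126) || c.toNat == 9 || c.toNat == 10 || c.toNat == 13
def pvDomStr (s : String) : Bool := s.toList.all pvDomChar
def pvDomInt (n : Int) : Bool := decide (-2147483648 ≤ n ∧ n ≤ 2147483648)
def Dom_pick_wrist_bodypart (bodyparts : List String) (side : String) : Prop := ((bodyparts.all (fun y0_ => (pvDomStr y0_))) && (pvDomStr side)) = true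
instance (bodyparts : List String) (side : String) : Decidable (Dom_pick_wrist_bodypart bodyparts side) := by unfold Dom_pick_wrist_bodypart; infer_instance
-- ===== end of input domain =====

-- B replaces A's two filter-then-sort passes by one scan keeping two running minima; same results, proved equal.
-- ===== PORT A =====
def pick_wrist_bodypart (bodyparts : List String) (side : String) : String :=
  let s := PySem.Str.lower side
  let cands := bodyparts.filter (fun bp =>
    PySem.Str.isIn "wrist" (PySem.Str.lower bp) && PySem.Str.isIn s (PySem.Str.lower bp))
  if cands ≠ [] then (PySem.List.sorted cands (fun x => x) false).headD ""
  else
    let cands2 := bodyparts.filter (fun bp => PySem.Str.isIn "wrist" (PySem.Str.lower bp))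
    if cands2 ≠ [] then (PySem.List.sorted cands2 (fun x => x) false).headD ""
    else ""  -- Python raises RuntimeError here; excluded by Pre_

-- ===== PORT B =====
def pick_wrist_bodypart_alt (bodyparts : List String) (side : String) : String :=
  let s := PySem.Str.lower side
  let st := bodyparts.foldl (fun (acc : Option String × Option String) bp =>
    let low := PySem.Str.lower bp
    if PySem.Str.isIn "wrist" low then
      let bw : Option String := match acc.2 with | none => some bp | some m => some (min m bp)
      if PySem.Str.isIn s low then
        (match acc.1 with | none => some bp | some m => some (min m bp), bw)
      else (acc.1, bw)
    else acc) (none, none)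
  match st.1, st.2 with
  | some x, _ => x
  | none, some y => y
  | none, none => ""  -- Python raises RuntimeError here; excluded by Pre_

-- ===== PRECONDITION & SPEC =====
-- Pre_ excludes exactly the inputs where no bodypart contains 'wrist': there A raises RuntimeError (B too).
def Pre_pick_wrist_bodypart (bodyparts : List String) (_side : String) : Prop :=
  bodyparts.any (fun bp => PySem.Str.isIn "wrist" (PySem.Str.lower bp)) = true
instance (bodyparts : List String) (side : String) : Decidable (Pre_pick_wrist_bodypart bodyparts side) := by unfold Pre_pick_wrist_bodypart; infer_instance
def pvWitness_pick_wrist_bodypart : List String × String := (["elbow", "LWrist", "RWrist"], "R")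
def Spec_pick_wrist_bodypart (bodyparts : List String) (side : String) (out : String) : Prop := out = pick_wrist_bodypart_alt bodyparts side
instance (bodyparts : List String) (side : String) (out : String) : Decidable (Spec_pick_wrist_bodypart bodyparts side out) := by unfold Spec_pick_wrist_bodypart; infer_instance

-- ===== CLAIM (what is proved, stated in full; the proofs are below) =====
def Claim_equal_pick_wrist_bodypart : Prop := ∀ (bodyparts : List String) (side : String), Dom_pick_wrist_bodypart bodyparts side → Pre_pick_wrist_bodypart bodyparts side → Spec_pick_wrist_bodypart bodyparts side (pick_wrist_bodypart bodyparts side)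

-- ===== LEMMAS AND PROOFS =====

-- running-minimum step used to describe B's fold componentwise
def pvOminStep (acc : Option String) (bp : String) : Option String :=
  match acc with | none => some bp | some m => some (min m bp)

theorem pvFold_decompose (xs : List String) (s : String) (a b : Option String) :
    xs.foldl (fun (acc : Option String × Option String) bp =>
      let low := PySem.Str.lower bp
      if PySem.Str.isIn "wrist" low then
        let bw : Option String := match acc.2 with | none => some bp | some m => some (min m bp)
        if PySem.Str.isIn s low then
          (match acc.1 with | none => some bp | some m => some (min m bp), bw)
        else (acc.1, bw)
      else acc) (a, b)
    = ((xs.filter (fun bp => PySem.Str.isIn "wrist" (PySem.Str.lower bp) && PySem.Str.isIn s (PySem.Str.lower bp))).foldl pvOminStep a,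
       (xs.filter (fun bp => PySem.Str.isIn "wrist" (PySem.Str.lower bp))).foldl pvOminStep b) := by
  induction xs generalizing a b with
  | nil => rfl
  | cons x t ih =>
    simp only [List.foldl_cons, List.filter_cons]
    by_cases hw : PySem.Str.isIn "wrist" (PySem.Str.lower x) = true
    · by_cases hs2 : PySem.Str.isIn s (PySem.Str.lower x) = true
      · simp only [hw, hs2, Bool.and_self, if_true, ih, List.foldl_cons, pvOminStep]
      · simp only [hw, hs2, if_true, ite_false, Bool.and_false,
          Bool.false_eq_true, ih, List.foldl_cons, pvOminStep]
      -- hs2 is a negation; simp uses it to refute the combined filter test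
    · simp only [hw, ite_false, Bool.false_and, Bool.false_eq_true, ih]

theorem pvFoldStep_some (t : List String) (x : String) :
    t.foldl pvOminStep (some x) = some (t.foldl min x) := by
  induction t generalizing x with
  | nil => rfl
  | cons y t ih => simp [pvOminStep, ih]

theorem pvFoldStep_eq_min? (l : List String) :
    l.foldl pvOminStep none = PySem.List.min? l (fun x => x) := by
  cases l with
  | nil => rfl
  | cons x t => simp [pvOminStep, pvFoldStep_some, PySem.List.min?_id_cons]

theorem pvSortedHead_eq_min? (l : List String) (hl : l ≠ []) :
    (PySem.List.sorted l (fun x => x) false).head?.getD "" = (PySem.List.min? l (fun x => x)).getD "" := by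
  obtain ⟨m, hm⟩ : ∃ m, PySem.List.min? l (fun x => x) = some m := by
    cases h : PySem.List.min? l (fun x => x) with
    | none => exact absurd ((PySem.List.min?_eq_none_iff l (fun x => x)).mp h) hl
    | some m => exact ⟨m, rfl⟩
  cases hs : PySem.List.sorted l (fun x => x) false with
  | nil => exact absurd ((PySem.List.sorted_eq_nil_iff l (fun x => x) false).mp hs) hl
  | cons h t =>
    have hhead_le : ∀ y ∈ l, h ≤ y :=
      PySem.List.key_head_sorted_le l (fun x => x) hs
    have hmem : h ∈ l :=
      (PySem.List.mem_sorted l (fun x => x) false h).mp (hs ▸ List.mem_cons_self ..)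
    have hm_mem : m ∈ l := PySem.List.min?_mem hm
    have hmin : ∀ y ∈ l, m ≤ y := fun y hy => PySem.List.min?_isMin hm y hy
    have : h = m := le_antisymm (hhead_le m hm_mem) (hmin h hmem)
    simp [hm, this]

-- ===== VERDICT (by name: the statement is the Claim_ definition above) =====
theorem pick_wrist_bodypart_spec : Claim_equal_pick_wrist_bodypart := by
  intro bodyparts side _ hpre
  unfold Spec_pick_wrist_bodypart pick_wrist_bodypart pick_wrist_bodypart_alt
  simp only [pvFold_decompose]
  set s := PySem.Str.lower side with hsdef
  set cands := bodyparts.filter (fun bp =>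
    PySem.Str.isIn "wrist" (PySem.Str.lower bp) && PySem.Str.isIn s (PySem.Str.lower bp)) with hc
  set cands2 := bodyparts.filter (fun bp => PySem.Str.isIn "wrist" (PySem.Str.lower bp)) with hc2
  have hc2ne : cands2 ≠ [] := by
    unfold Pre_pick_wrist_bodypart at hpre
    rw [List.any_eq_true] at hpre
    obtain ⟨x, hx, hpx⟩ := hpre
    intro h
    exact absurd hpx (by simpa using List.filter_eq_nil_iff.mp h x hx)
  by_cases hne : cands = []
  · obtain ⟨m2, hm2⟩ : ∃ m2, PySem.List.min? cands2 (fun x => x) = some m2 := by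
      cases h : PySem.List.min? cands2 (fun x => x) with
      | none => exact absurd ((PySem.List.min?_eq_none_iff cands2 (fun x => x)).mp h) hc2ne
      | some m => exact ⟨m, rfl⟩
    simp [hne, hc2ne, pvFoldStep_eq_min?, pvSortedHead_eq_min? cands2 hc2ne, hm2]
  · obtain ⟨m, hm⟩ : ∃ m, PySem.List.min? cands (fun x => x) = some m := by
      cases h : PySem.List.min? cands (fun x => x) with
      | none => exact absurd ((PySem.List.min?_eq_none_iff cands (fun x => x)).mp h) hne
      | some m => exact ⟨m, rfl⟩
    simp [hne, pvFoldStep_eq_min?, pvSortedHead_eq_min? cands hne, hm]
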